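-- pv_equiv track=rewrite | github.com/pypi-data/pypi-mirror-401 | packages/matrice-analytics/matrice_analytics-0.1.114.tar.gz/matrice_analytics-0.1.114/src/matrice_analytics/post_processing/utils/counting_utils.py | count_unique_tracks
-- ===== SOURCE A (Python) =====
-- from typing import List, Dict, Any, Tuple, Optional, Set
-- from collections import defaultdict
--
-- def count_unique_tracks(results: Dict[str, List[Dict]]) -> Dict[str, int]:
--     """
--     Count unique tracks by category from tracking results.
--
--     Args:
--         results: Tracking results in frame format
--
--     Returns:
--         Dict[str, int]: Unique track counts by category
--     """
--     unique_tracks = defaultdict(set)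
--
--     for frame_id, detections in results.items():
--         if isinstance(detections, list):
--             for detection in detections:
--                 track_id = detection.get("track_id")
--                 category = detection.get("category", "unknown")
--
--                 if track_id is not None:
--                     unique_tracks[category].add(track_id)
--
--     return {category: len(tracks) for category, tracks in unique_tracks.items()}
-- ===== SOURCE B (Python) =====
-- def count_unique_tracks(results):
--     # Two staged passes: first flatten all detections into a plain event list of
--     # (category, track_id) pairs; then build the counts dict by, at each category's
--     # first occurrence, recounting its distinct track ids with a filtered set
--     # comprehension over the event list. No per-category sets are maintained
--     # incrementally during the scan.
--     events = []
--     for frame_id, detections in results.items():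
--         if isinstance(detections, list):
--             for detection in detections:
--                 track_id = detection.get("track_id")
--                 if track_id is not None:
--                     events.append((detection.get("category", "unknown"), track_id))
--     counts = {}
--     for category, _ in events:
--         if category not in counts:
--             counts[category] = len({t for c, t in events if c == category})
--     return counts
-- ===== Notes on version B (the rewrite author's own statement) =====
-- stated objective: alternative
-- what changed: B first flattens the frames into a plain list of (category, track_id) events, then builds the result in a second pass that, at each category's first occurrence, recounts that category's distinct track ids by filtering the whole event list; it maintains no per-category sets during the scan, unlike A's incremental defaultdict(set).
import Mathlib
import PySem

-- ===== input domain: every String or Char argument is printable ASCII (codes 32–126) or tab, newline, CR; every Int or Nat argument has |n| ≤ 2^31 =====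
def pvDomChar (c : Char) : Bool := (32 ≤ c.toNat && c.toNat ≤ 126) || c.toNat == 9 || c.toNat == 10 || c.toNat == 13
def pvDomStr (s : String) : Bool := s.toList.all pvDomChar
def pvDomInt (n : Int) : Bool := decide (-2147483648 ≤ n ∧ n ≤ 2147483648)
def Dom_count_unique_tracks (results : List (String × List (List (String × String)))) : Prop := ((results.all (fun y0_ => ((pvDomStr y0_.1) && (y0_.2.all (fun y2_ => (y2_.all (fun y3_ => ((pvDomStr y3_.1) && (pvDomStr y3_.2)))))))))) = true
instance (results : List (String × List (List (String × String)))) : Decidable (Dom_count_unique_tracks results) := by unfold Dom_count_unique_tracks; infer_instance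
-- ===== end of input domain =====

-- B replaces A's incremental defaultdict-of-sets with two staged passes: flatten to a plain
-- (category, track_id) event list, then count each category's distinct track ids on its first
-- occurrence by filtering the whole event list (alternative decomposition, not faster).
-- The Python `isinstance(detections, list)` check is always true under the declared type and
-- is therefore not represented in the ports.

-- ===== PORT A =====
def count_unique_tracks (results : List (String × List (List (String × String)))) : List (String × Int) :=
  -- unique_tracks = defaultdict(set); double loop over frames and detections
  let unique_tracks : PySem.Dict String (PySem.Set String) :=
    results.foldl (fun ut fr =>
      fr.2.foldl (fun ut det =>
        let track_id := PySem.Dict.get? (PySem.Dict.mk det) "track_id"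
        let category := PySem.Dict.getD (PySem.Dict.mk det) "category" "unknown"
        match track_id with
        | some tid => ut.insert category (PySem.Set.add (ut.getD category PySem.Set.empty) tid)
        | none => ut) ut) PySem.Dict.empty
  -- {category: len(tracks) for category, tracks in unique_tracks.items()}
  (unique_tracks.items.foldl (fun r p => r.insert p.1 (PySem.Set.len p.2)) PySem.Dict.empty).items

-- ===== PORT B =====
def count_unique_tracks_alt (results : List (String × List (List (String × String)))) : List (String × Int) :=
  -- pass 1: events = flat list of (category, track_id) pairs, in order
  let events : List (String × String) :=
    results.foldl (fun ev fr =>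
      fr.2.foldl (fun ev det =>
        match PySem.Dict.get? (PySem.Dict.mk det) "track_id" with
        | some tid => ev ++ [(PySem.Dict.getD (PySem.Dict.mk det) "category" "unknown", tid)]
        | none => ev) ev) []
  -- pass 2: at each category's first occurrence, count its distinct track ids by filtering events
  let counts : PySem.Dict String Int :=
    events.foldl (fun counts p =>
      if counts.contains p.1 then counts
      else counts.insert p.1 (PySem.Set.len
        (PySem.Set.ofList ((events.filter (fun q => q.1 == p.1)).map (·.2))))) PySem.Dict.empty
  counts.items

-- ===== PRECONDITION & SPEC =====
def Spec_count_unique_tracks (results : List (String × List (List (String × String)))) (out : List (String × Int)) : Prop := out = count_unique_tracks_alt results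
instance (results : List (String × List (List (String × String)))) (out : List (String × Int)) : Decidable (Spec_count_unique_tracks results out) := by unfold Spec_count_unique_tracks; infer_instance

-- ===== CLAIM (what is proved, stated in full; the proofs are below) =====
def Claim_equal_count_unique_tracks : Prop := ∀ (results : List (String × List (List (String × String)))), Dom_count_unique_tracks results → Spec_count_unique_tracks results (count_unique_tracks results)

-- ===== LEMMAS AND PROOFS =====

-- the (category, track_id) pair a detection contributes, if any
def pvExtract (det : List (String × String)) : Option (String × String) :=
  (PySem.Dict.get? (PySem.Dict.mk det) "track_id").map
    (fun tid => (PySem.Dict.getD (PySem.Dict.mk det) "category" "unknown", tid))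

-- A's per-pair step on the dict of sets
def pvStepA (ut : PySem.Dict String (PySem.Set String)) (p : String × String) :
    PySem.Dict String (PySem.Set String) :=
  ut.insert p.1 (PySem.Set.add (ut.getD p.1 PySem.Set.empty) p.2)

-- the flat list of (category, track_id) events both programs process
def pvEvents (results : List (String × List (List (String × String)))) : List (String × String) :=
  (results.flatMap (·.2)).filterMap pvExtract

-- first-seen category order and per-category distinct track ids of an event list
def pvKeys (events : List (String × String)) : List String :=
  PySem.Set.ofList (events.map (·.1))

def pvVal (events : List (String × String)) (c : String) : List String :=
  ((PySem.Set.ofList events).filter (fun p => p.1 == c)).map (·.2)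

lemma pv_foldl_filterMap {α β γ : Type} (f : α → Option β) (g : γ → β → γ) :
    ∀ (l : List α) (init : γ),
      l.foldl (fun acc a => match f a with | some b => g acc b | none => acc) init
        = (l.filterMap f).foldl g init := by
  intro l
  induction l with
  | nil => intro init; rfl
  | cons a l ih =>
    intro init
    cases h : f a <;> simp [h, ih]

lemma pvA_events (results : List (String × List (List (String × String)))) :
    (results.foldl (fun ut fr =>
      fr.2.foldl (fun ut det =>
        let track_id := PySem.Dict.get? (PySem.Dict.mk det) "track_id"
        let category := PySem.Dict.getD (PySem.Dict.mk det) "category" "unknown"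
        match track_id with
        | some tid => ut.insert category (PySem.Set.add (ut.getD category PySem.Set.empty) tid)
        | none => ut) ut) PySem.Dict.empty)
      = (pvEvents results).foldl pvStepA PySem.Dict.empty := by
  unfold pvEvents
  have hstep : (fun (ut : PySem.Dict String (PySem.Set String)) (det : List (String × String)) =>
      let track_id := PySem.Dict.get? (PySem.Dict.mk det) "track_id"
      let category := PySem.Dict.getD (PySem.Dict.mk det) "category" "unknown"
      match track_id with
      | some tid => ut.insert category (PySem.Set.add (ut.getD category PySem.Set.empty) tid)
      | none => ut)
      = (fun acc a => match pvExtract a with | some b => pvStepA acc b | none => acc) := by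
    funext ut det
    cases h : PySem.Dict.get? (PySem.Dict.mk det) "track_id" <;> simp [pvExtract, pvStepA, h]
  rw [hstep, ← pv_foldl_filterMap pvExtract pvStepA, List.foldl_flatMap]
  congr 1
  funext acc x
  congr 1
  funext s a
  cases pvExtract a <;> simp

lemma pvB_events (results : List (String × List (List (String × String)))) :
    (results.foldl (fun ev fr =>
      fr.2.foldl (fun ev det =>
        match PySem.Dict.get? (PySem.Dict.mk det) "track_id" with
        | some tid => ev ++ [(PySem.Dict.getD (PySem.Dict.mk det) "category" "unknown", tid)]
        | none => ev) ev) ([] : List (String × String)))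
      = pvEvents results := by
  unfold pvEvents
  have hstep : (fun (ev : List (String × String)) (det : List (String × String)) =>
      match PySem.Dict.get? (PySem.Dict.mk det) "track_id" with
      | some tid => ev ++ [(PySem.Dict.getD (PySem.Dict.mk det) "category" "unknown", tid)]
      | none => ev)
      = (fun acc a => match pvExtract a with | some b => acc ++ [b] | none => acc) := by
    funext ev det
    cases h : PySem.Dict.get? (PySem.Dict.mk det) "track_id" <;> simp [pvExtract, h]
  have h2 := pv_foldl_filterMap pvExtract (fun acc b => acc ++ [b])
      (results.flatMap (·.2)) ([] : List (String × String))
  rw [PySem.List.foldl_append_singleton_eq_self, List.nil_append] at h2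
  rw [hstep, ← h2, List.foldl_flatMap]
  congr 1
  funext acc x
  congr 1
  funext s a
  cases pvExtract a <;> simp

lemma pv_get?_mkmap {β : Type} (ks : List String) (v : String → β) (c : String) :
    PySem.Dict.get? (PySem.Dict.mk (ks.map (fun k => (k, v k)))) c
      = if c ∈ ks then some (v c) else none := by
  induction ks with
  | nil => simp [PySem.Dict.get?]
  | cons k ks ih =>
    by_cases hk : k == c
    · have : k = c := eq_of_beq hk
      subst this
      simp [PySem.Dict.get?]
    · have hne : c ≠ k := by intro h; exact hk (by simp [h])
      simp only [PySem.Dict.get?, List.map_cons, List.find?_cons, hk] at ih ⊢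
      rw [ih]
      simp [List.mem_cons, hne]

lemma pv_contains_mkmap {β : Type} (ks : List String) (v : String → β) (c : String) :
    PySem.Dict.contains (PySem.Dict.mk (ks.map (fun k => (k, v k)))) c = decide (c ∈ ks) := by
  simp [PySem.Dict.contains, List.any_map]
  induction ks with
  | nil => simp
  | cons k ks ih =>
    by_cases hk : k == c
    · have : k = c := eq_of_beq hk; subst this; simp
    · have hne : c ≠ k := fun h => hk (by simp [h])
      simp [hk, ih, hne]

lemma pv_insert_mkmap_mem {β : Type} (ks : List String) (v : String → β) {c0 : String}
    (h : c0 ∈ ks) (w : β) :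
    PySem.Dict.insert (PySem.Dict.mk (ks.map (fun k => (k, v k)))) c0 w
      = PySem.Dict.mk (ks.map (fun k => (k, if k == c0 then w else v k))) := by
  have hc : PySem.Dict.contains (PySem.Dict.mk (ks.map (fun k => (k, v k)))) c0 = true := by
    rw [pv_contains_mkmap]; simpa using h
  simp only [PySem.Dict.insert, hc, if_pos]
  congr 1
  rw [List.map_map]
  apply List.map_congr_left
  intro k _
  by_cases hk : k == c0
  · have : k = c0 := eq_of_beq hk
    subst this
    simp
  · have hne : k ≠ c0 := fun he => hk (by simp [he])
    simp [hk, hne]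

lemma pv_insert_mkmap_not_mem {β : Type} (ks : List String) (v : String → β) {c0 : String}
    (h : c0 ∉ ks) (w : β) :
    PySem.Dict.insert (PySem.Dict.mk (ks.map (fun k => (k, v k)))) c0 w
      = PySem.Dict.mk ((ks ++ [c0]).map (fun k => (k, if k == c0 then w else v k))) := by
  have hc : PySem.Dict.contains (PySem.Dict.mk (ks.map (fun k => (k, v k)))) c0 = false := by
    rw [pv_contains_mkmap]; simpa using h
  simp only [PySem.Dict.insert, hc, Bool.false_eq_true, if_false]
  congr 1
  rw [List.map_append]
  simp only [List.map_cons, List.map_nil, BEq.rfl, if_pos]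
  congr 1
  apply List.map_congr_left
  intro k hkmem
  have : k ≠ c0 := fun he => h (he ▸ hkmem)
  simp [this]

lemma pv_mem_pvVal (events : List (String × String)) (c t : String) :
    t ∈ pvVal events c ↔ (c, t) ∈ events := by
  simp only [pvVal, List.mem_map, List.mem_filter, PySem.Set.mem_ofList]
  constructor
  · rintro ⟨p, ⟨hp, hpc⟩, hpt⟩
    have : p.1 = c := eq_of_beq hpc
    have : p = (c, t) := by cases p; simp_all
    exact this ▸ hp
  · intro hm
    exact ⟨(c, t), ⟨hm, by simp⟩, rfl⟩

lemma pvKeys_append (events : List (String × String)) (p : String × String) :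
    pvKeys (events ++ [p])
      = if p.1 ∈ events.map (·.1) then pvKeys events else pvKeys events ++ [p.1] := by
  simp only [pvKeys, List.map_append, List.map_cons, List.map_nil]
  rw [PySem.Set.ofList_append_singleton, PySem.Set.add_eq_ite]
  by_cases h : p.1 ∈ events.map (·.1) <;> simp [PySem.Set.mem_ofList, h]

lemma pvVal_append_of_mem {events : List (String × String)} {p : String × String}
    (hp : p ∈ events) : pvVal (events ++ [p]) = pvVal events := by
  funext c
  simp only [pvVal]
  rw [PySem.Set.ofList_append_singleton,
      PySem.Set.add_of_mem (by simpa [PySem.Set.mem_ofList] using hp)]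

lemma pvVal_append_of_not_mem {events : List (String × String)} {p : String × String}
    (hp : p ∉ events) :
    pvVal (events ++ [p]) = fun c => pvVal events c ++ (if p.1 == c then [p.2] else []) := by
  funext c
  simp only [pvVal]
  rw [PySem.Set.ofList_append_singleton,
      PySem.Set.add_of_not_mem (by simpa [PySem.Set.mem_ofList] using hp)]
  rw [List.filter_append, List.map_append]
  congr 1
  by_cases h : p.1 == c <;> simp [h]

lemma pvVal_eq_nil_of_not_mem {events : List (String × String)} {c : String}
    (h : c ∉ events.map (·.1)) : pvVal events c = [] := by
  simp only [pvVal, List.map_eq_nil_iff, List.filter_eq_nil_iff]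
  intro q hq
  have : q.1 ∈ events.map (·.1) := List.mem_map_of_mem (by simpa [PySem.Set.mem_ofList] using hq)
  intro hbeq
  exact h (eq_of_beq hbeq ▸ this)

-- invariant: A's dict of sets groups the events by category, keys in first-seen order
lemma pvGrouped : ∀ events : List (String × String),
    events.foldl pvStepA PySem.Dict.empty
      = PySem.Dict.mk ((pvKeys events).map (fun c => (c, pvVal events c))) := by
  intro events
  induction events using List.reverseRecOn with
  | nil => rfl
  | append_singleton es p ih =>
    rw [List.foldl_append, List.foldl_cons, List.foldl_nil, ih]
    unfold pvStepA
    by_cases hk : p.1 ∈ es.map (·.1)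
    · have hkk : p.1 ∈ pvKeys es := by simpa [pvKeys, PySem.Set.mem_ofList] using hk
      have hget : PySem.Dict.getD
          (PySem.Dict.mk ((pvKeys es).map (fun c => (c, pvVal es c)))) p.1 PySem.Set.empty
          = pvVal es p.1 := by
        simp [PySem.Dict.getD, pv_get?_mkmap, hkk]
      by_cases hp : p ∈ es
      · have hmem2 : p.2 ∈ pvVal es p.1 := (pv_mem_pvVal es p.1 p.2).2 (by simpa using hp)
        rw [hget, PySem.Set.add_of_mem hmem2, pv_insert_mkmap_mem _ _ hkk]
        rw [pvKeys_append, if_pos hk, pvVal_append_of_mem hp]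
        congr 1
        apply List.map_congr_left
        intro k _
        by_cases hbe : k == p.1
        · have : k = p.1 := eq_of_beq hbe; subst this; simp
        · simp [hbe]
      · have hnmem2 : p.2 ∉ pvVal es p.1 :=
          fun hm => hp (by simpa using (pv_mem_pvVal es p.1 p.2).1 hm)
        rw [hget, PySem.Set.add_of_not_mem hnmem2, pv_insert_mkmap_mem _ _ hkk]
        rw [pvKeys_append, if_pos hk, pvVal_append_of_not_mem hp]
        congr 1
        apply List.map_congr_left
        intro k _
        by_cases hbe : k == p.1
        · have : k = p.1 := eq_of_beq hbe; subst this; simp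
        · have hbe2 : ¬ (p.1 == k) = true := fun h2 => hbe (by simp [eq_of_beq h2])
          simp [hbe, hbe2]
    · have hkk : p.1 ∉ pvKeys es := by simpa [pvKeys, PySem.Set.mem_ofList] using hk
      have hp : p ∉ es := fun hm => hk (List.mem_map_of_mem hm)
      have hget : PySem.Dict.getD
          (PySem.Dict.mk ((pvKeys es).map (fun c => (c, pvVal es c)))) p.1 PySem.Set.empty
          = PySem.Set.empty := by
        simp [PySem.Dict.getD, pv_get?_mkmap, hkk]
      have hadd : PySem.Set.add PySem.Set.empty p.2 = [p.2] := by
        simp [PySem.Set.add, PySem.Set.empty]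
      rw [hget, hadd, pv_insert_mkmap_not_mem _ _ hkk]
      rw [pvKeys_append, if_neg hk, pvVal_append_of_not_mem hp]
      congr 1
      apply List.map_congr_left
      intro k hkmem
      rcases List.mem_append.1 hkmem with hks | hsing
      · have hne : k ≠ p.1 := fun he => hkk (he ▸ hks)
        have hbe : ¬ (k == p.1) = true := fun h2 => hne (eq_of_beq h2)
        have hbe2 : ¬ (p.1 == k) = true := fun h2 => hne (eq_of_beq h2).symm
        simp [hbe, hbe2]
      · have : k = p.1 := by simpa using hsing
        subst this
        simp [pvVal_eq_nil_of_not_mem hk]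

-- A's final dict comprehension, on a grouped items list with distinct keys
lemma pv_foldl_insert_items (v : String → PySem.Set String) :
    ∀ (ks : List String) (d : PySem.Dict String Int),
      (d.keys ++ ks).Nodup →
      ((ks.map (fun c => (c, v c))).foldl
          (fun r p => r.insert p.1 (PySem.Set.len p.2)) d).items
        = d.items ++ ks.map (fun c => (c, PySem.Set.len (v c))) := by
  intro ks
  induction ks with
  | nil => intro d _; simp
  | cons k ks ih =>
    intro d h
    rcases List.nodup_append.1 h with ⟨h1, h2, hd⟩
    have hk : k ∉ d.keys := fun hm => hd k hm k (by simp) rfl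
    have hc : d.contains k = false := by
      simp only [PySem.Dict.contains, List.any_eq_false]
      intro p hp hbe
      exact hk (by simp only [PySem.Dict.keys]; exact eq_of_beq hbe ▸ List.mem_map_of_mem hp)
    rw [List.map_cons, List.foldl_cons,
        show d.insert k (PySem.Set.len (v k)) = PySem.Dict.mk (d.items ++ [(k, PySem.Set.len (v k))]) by
          simp [PySem.Dict.insert, hc]]
    rw [ih]
    · simp
    · have hkeys : (PySem.Dict.mk (d.items ++ [(k, PySem.Set.len (v k))])).keys = d.keys ++ [k] := by
        simp [PySem.Dict.keys]
      rw [hkeys, List.append_assoc]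
      simpa [List.nodup_append] using h

-- B's second pass builds exactly one entry per first-seen category
lemma pvB_build (V : String → Int) :
    ∀ (es : List (String × String)) (ks : List String),
      (es.foldl (fun counts p =>
          if counts.contains p.1 then counts else counts.insert p.1 (V p.1))
        (PySem.Dict.mk (ks.map (fun k => (k, V k)))))
      = PySem.Dict.mk (((es.map (·.1)).foldl PySem.Set.add ks).map (fun k => (k, V k))) := by
  intro es
  induction es with
  | nil => intro ks; rfl
  | cons p es ih =>
    intro ks
    rw [List.foldl_cons, pv_contains_mkmap, List.map_cons, List.foldl_cons]
    by_cases h : p.1 ∈ ks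
    · rw [if_pos (by simpa using h), PySem.Set.add_of_mem h, ih]
    · rw [if_neg (by simpa using h), PySem.Set.add_of_not_mem h]
      have hins : PySem.Dict.insert (PySem.Dict.mk (ks.map (fun k => (k, V k)))) p.1 (V p.1)
          = PySem.Dict.mk ((ks ++ [p.1]).map (fun k => (k, V k))) := by
        have hc : PySem.Dict.contains (PySem.Dict.mk (ks.map (fun k => (k, V k)))) p.1 = false := by
          rw [pv_contains_mkmap]; simpa using h
        simp [PySem.Dict.insert, hc]
      rw [hins, ih]

-- filtering commutes with dedup (first occurrences)
lemma pv_filter_ofList {α : Type} [BEq α] [LawfulBEq α] (p : α → Bool) :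
    ∀ l : List α, (PySem.Set.ofList l).filter p = PySem.Set.ofList (l.filter p) := by
  intro l
  induction l using List.reverseRecOn with
  | nil => rfl
  | append_singleton xs x ih =>
    rw [PySem.Set.ofList_append_singleton, List.filter_append]
    by_cases hpx : p x
    · rw [show List.filter p [x] = [x] from by simp [hpx], PySem.Set.ofList_append_singleton]
      by_cases hx : x ∈ xs
      · rw [PySem.Set.add_of_mem ((PySem.Set.mem_ofList _ _).mpr hx), ih,
            PySem.Set.add_of_mem ((PySem.Set.mem_ofList _ _).mpr (List.mem_filter.mpr ⟨hx, hpx⟩))]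
      · rw [PySem.Set.add_of_not_mem (fun hm => hx ((PySem.Set.mem_ofList _ _).mp hm)),
            List.filter_append, show List.filter p [x] = [x] from by simp [hpx], ih,
            PySem.Set.add_of_not_mem
              (fun hm => hx (List.mem_filter.mp ((PySem.Set.mem_ofList _ _).mp hm)).1)]
    · rw [show List.filter p [x] = [] from by simp [hpx], List.append_nil]
      by_cases hx : x ∈ xs
      · rw [PySem.Set.add_of_mem ((PySem.Set.mem_ofList _ _).mpr hx), ih]
      · rw [PySem.Set.add_of_not_mem (fun hm => hx ((PySem.Set.mem_ofList _ _).mp hm)),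
            List.filter_append, show List.filter p [x] = [] from by simp [hpx],
            List.append_nil, ih]

-- on pairs whose first component is constant, taking seconds commutes with dedup
lemma pv_map_snd_ofList (c : String) :
    ∀ l : List (String × String), (∀ q ∈ l, q.1 = c) →
      (PySem.Set.ofList l).map (·.2) = PySem.Set.ofList (l.map (·.2)) := by
  intro l
  induction l using List.reverseRecOn with
  | nil => intro _; rfl
  | append_singleton xs x ih =>
    intro hall
    have hx1 : x.1 = c := hall x (by simp)
    have hxs : ∀ q ∈ xs, q.1 = c := fun q hq => hall q (by simp [hq])
    rw [PySem.Set.ofList_append_singleton, List.map_append,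
        show List.map (fun q : String × String => q.2) [x] = [x.2] from rfl,
        PySem.Set.ofList_append_singleton]
    by_cases hx : x ∈ xs
    · rw [PySem.Set.add_of_mem ((PySem.Set.mem_ofList _ _).mpr hx),
          PySem.Set.add_of_mem ((PySem.Set.mem_ofList _ _).mpr (List.mem_map.mpr ⟨x, hx, rfl⟩)),
          ih hxs]
    · have hx2 : x.2 ∉ List.map (fun q : String × String => q.2) xs := by
        intro hm
        rcases List.mem_map.1 hm with ⟨q, hq, hq2⟩
        have : q = x := Prod.ext ((hxs q hq).trans hx1.symm) hq2
        exact hx (this ▸ hq)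
      rw [PySem.Set.add_of_not_mem (fun hm => hx ((PySem.Set.mem_ofList _ _).mp hm)),
          PySem.Set.add_of_not_mem (fun hm => hx2 ((PySem.Set.mem_ofList _ _).mp hm)),
          List.map_append, show List.map (fun q : String × String => q.2) [x] = [x.2] from rfl,
          ih hxs]

-- per category, A's grouped distinct track ids are B's dedup of the filtered seconds
lemma pvVal_eq (events : List (String × String)) (c : String) :
    pvVal events c = PySem.Set.ofList ((events.filter (fun q => q.1 == c)).map (·.2)) := by
  unfold pvVal
  rw [pv_filter_ofList]
  exact pv_map_snd_ofList c _ (fun q hq => eq_of_beq (List.mem_filter.1 hq).2)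

-- ===== VERDICT (by name: the statement is the Claim_ definition above) =====
theorem count_unique_tracks_spec : Claim_equal_count_unique_tracks := by
  intro results _
  unfold Spec_count_unique_tracks
  simp only [count_unique_tracks, count_unique_tracks_alt]
  rw [pvA_events, pvB_events, pvGrouped]
  rw [show (PySem.Dict.mk ((pvKeys (pvEvents results)).map
      (fun c => (c, pvVal (pvEvents results) c)))).items
      = (pvKeys (pvEvents results)).map (fun c => (c, pvVal (pvEvents results) c)) from rfl]
  rw [pv_foldl_insert_items (pvVal (pvEvents results)) (pvKeys (pvEvents results))
        PySem.Dict.empty (by simpa [PySem.Dict.keys, pvKeys] using PySem.Set.nodup_ofList _)]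
  rw [show (PySem.Dict.empty : PySem.Dict String Int).items = [] from rfl, List.nil_append]
  have hB := pvB_build (fun c => PySem.Set.len
      (PySem.Set.ofList (((pvEvents results).filter (fun q => q.1 == c)).map (·.2))))
      (pvEvents results) ([] : List String)
  rw [List.map_nil] at hB
  rw [show (PySem.Dict.empty : PySem.Dict String Int) = PySem.Dict.mk [] from rfl, hB]
  have hmap : ((pvKeys (pvEvents results)).map
        (fun c => (c, PySem.Set.len (pvVal (pvEvents results) c))))
      = ((pvKeys (pvEvents results)).map (fun c => (c, PySem.Set.len
          (PySem.Set.ofList (((pvEvents results).filter (fun q => q.1 == c)).map (·.2)))))) :=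
    List.map_congr_left (fun c _ => by rw [pvVal_eq])
  exact hmap.trans rfl
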